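-- pv_equiv track=rewrite | github.com/KevinDo76/Ascii-Player | src/run.py | reconstructFrame
-- ===== SOURCE A (Python) =====
-- def reconstructFrame(lastframe, changedata):
--     parse=[]
--     temp=["",""]
--     read=0
--     chunkread=False
--     output=""
--     while (read<len(changedata)):
--         if not chunkread and changedata[read].isdigit():
--             chunkread=True
--             while changedata[read].isdigit():
--                 temp[0]+=changedata[read]
--                 read+=1
--         elif chunkread and changedata[read].isdigit():
--             chunkread=False
--             parse.append(temp)
--             temp=["",""]
--         else:
--             temp[1]+=changedata[read]
--             read+=1
--     parse.append(temp)
--     lastInsert=0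
--     if len(parse)==1 and parse[0][1]=="":
--         return lastframe
--     else:
--         for i in parse:
--             output+=lastframe[lastInsert:int(i[0])]+i[1]
--             lastInsert=int(i[0])+len(i[1])
--         output+=lastframe[lastInsert:len(lastframe)]
--     return output
-- ===== SOURCE B (Python) =====
-- def reconstructFrame(lastframe, changedata):
--     # Phase 1: tokenize changedata into maximal runs of digits / non-digits.
--     runs = []
--     cur = None  # (isdig, run) of the run being collected
--     for ch in changedata:
--         isdig = ch.isdigit()
--         if cur is not None and cur[0] == isdig:
--             cur = (isdig, cur[1] + ch)
--         else:
--             if cur is not None: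
--                 runs.append(cur)
--             cur = (isdig, ch)
--     if cur is not None:
--         runs.append(cur)
--     # Phase 2: fold runs into (digits, text) pairs; a digit run starts a new
--     # pair when the current pair already has digits; leading text merges into
--     # the first pair.
--     parse = []
--     digits, text = "", ""
--     for isdig, run in runs:
--         if isdig:
--             if digits:
--                 parse.append((digits, text))
--                 digits, text = run, ""
--             else:
--                 digits = run
--         else:
--             text += run
--     parse.append((digits, text))
--     if len(parse) == 1 and text == "":
--         return lastframe
--     # Phase 3: reconstruct by collecting pieces and joining once.
--     pieces = []
--     cursor = 0
--     for digits, text in parse: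
--         pos = int(digits)
--         pieces.append(lastframe[cursor:pos])
--         pieces.append(text)
--         cursor = pos + len(text)
--     pieces.append(lastframe[cursor:])
--     return "".join(pieces)
-- ===== Notes on version B (the rewrite author's own statement) =====
-- stated objective: alternative
-- what changed: A's single char-by-char parsing state machine (chunkread flag, one char per iteration, re-examining the current char on pair boundaries) is replaced by a three-phase pipeline: tokenize changedata into maximal digit/non-digit runs, fold the runs into (digits,text) pairs, then reconstruct by collecting slices in a list and joining once instead of A's repeated string concatenation.
-- crash fix: On changedata ending in a digit A raises IndexError (its inner while checks changedata[read] one past the end); B returns the reconstructed frame there. — e.g. on reconstructFrame("abcdef", "2X4"): A raises IndexError, B returns "abXdef"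
import Mathlib
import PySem

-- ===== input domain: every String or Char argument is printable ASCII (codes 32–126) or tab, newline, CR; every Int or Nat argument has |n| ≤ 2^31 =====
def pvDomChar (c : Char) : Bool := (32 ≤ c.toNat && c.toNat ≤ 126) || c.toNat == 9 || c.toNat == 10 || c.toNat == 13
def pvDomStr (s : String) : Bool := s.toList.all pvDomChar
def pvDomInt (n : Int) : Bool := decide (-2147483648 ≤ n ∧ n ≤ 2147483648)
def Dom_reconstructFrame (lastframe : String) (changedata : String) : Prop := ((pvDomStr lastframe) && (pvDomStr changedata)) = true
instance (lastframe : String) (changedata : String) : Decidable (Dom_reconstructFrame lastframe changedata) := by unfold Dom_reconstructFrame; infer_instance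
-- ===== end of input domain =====

-- B replaces A's char-by-char parsing state machine by tokenize-into-runs + fold and A's
-- repeated string concatenation by a collected-pieces join (objective: alternative).

-- ===== PORT A =====
-- A's while loops consume exactly one character per executed iteration; this recursion is
-- that per-character control flow, with `inner` recording whether execution is inside the
-- inner `while changedata[read].isdigit()` loop.  none = IndexError (the inner while's
-- condition check reads past the end).  The branch `chunkread and digit` does not consume
-- a character in A: it appends temp, resets it, and the next outer iteration necessarily
-- takes the first branch on the same (digit) character, entering the inner loop — here the
-- two steps are fused into one, consuming that character.
def pvA_loop : List Char → Bool → (List Char × List Char) → Bool → List (List Char × List Char) →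
    Option (List (List Char × List Char) × (List Char × List Char))
  | [], inner, temp, _, parse => if inner then none else some (parse, temp)
  | c :: rest, inner, temp, chunkread, parse =>
    if inner then
      if c.isDigit then
        -- inner while continues: temp[0] += c
        pvA_loop rest true (temp.1 ++ [c], temp.2) chunkread parse
      else
        -- inner while exits; the outer loop's else branch consumes c: temp[1] += c
        pvA_loop rest false (temp.1, temp.2 ++ [c]) chunkread parse
    else if !chunkread && c.isDigit then
      -- first branch: chunkread = True, enter the inner while (first digit consumed)
      pvA_loop rest true (temp.1 ++ [c], temp.2) true parse
    else if chunkread && c.isDigit then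
      -- second branch: parse.append(temp); temp = ["",""]; then (same c, chunkread now
      -- False) the first branch fires and enters the inner while consuming c
      pvA_loop rest true ([c], []) true (parse ++ [temp])
    else
      -- else branch: temp[1] += c
      pvA_loop rest false (temp.1, temp.2 ++ [c]) chunkread parse

-- the reconstruction for-loop of A: output += lastframe[lastInsert:int(i[0])] + i[1];
-- none = ValueError from int('')
def pvA_reconstruct : List (List Char × List Char) → List Char → Int → List Char → Option (List Char)
  | [], lastframe, lastInsert, output =>
    some (output ++ PySem.List.slice lastframe (some lastInsert) (some (lastframe.length : Int)))
  | p :: rest, lastframe, lastInsert, output =>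
    match PySem.Int.ofChars? p.1 with
    | none => none
    | some k =>
      pvA_reconstruct rest lastframe (k + p.2.length)
        (output ++ PySem.List.slice lastframe (some lastInsert) (some k) ++ p.2)

def reconstructFrame (lastframe : String) (changedata : String) : String :=
  match pvA_loop changedata.toList false ([], []) false [] with
  | none => ""  -- IndexError (outside Pre_)
  | some (parse0, temp) =>
    let parse := parse0 ++ [temp]
    -- parse[0]: parse is nonempty, headD is its first element
    if parse.length = 1 ∧ (parse.headD ([], [])).2 = [] then lastframe
    else
      match pvA_reconstruct parse lastframe.toList 0 [] with
      | some out => String.mk out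
      | none => ""  -- ValueError (outside Pre_)

-- ===== PORT B =====
-- Phase 1 of B: tokenize into maximal (isdigit, run) runs; pvB_runsAux carries the run
-- being collected (B's `cur`); on a mismatching character the run is emitted and a new one
-- starts.  pvB_runs handles B's `cur is None` start state.
def pvB_runsAux : List Char → Bool → List Char → List (Bool × List Char)
  | [], curdig, cur => [(curdig, cur)]
  | c :: rest, curdig, cur =>
    if c.isDigit == curdig then pvB_runsAux rest curdig (cur ++ [c])
    else (curdig, cur) :: pvB_runsAux rest c.isDigit [c]

def pvB_runs : List Char → List (Bool × List Char)
  | [] => []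
  | c :: rest => pvB_runsAux rest c.isDigit [c]

-- Phase 2 of B: fold the runs into (digits, text) pairs
def pvB_fold : List (Bool × List Char) → List Char → List Char → List (List Char × List Char) →
    List (List Char × List Char) × (List Char × List Char)
  | [], d, t, parse => (parse, (d, t))
  | (isdig, run) :: rs, d, t, parse =>
    if isdig then
      if d ≠ [] then pvB_fold rs run [] (parse ++ [(d, t)])
      else pvB_fold rs run t parse
    else pvB_fold rs d (t ++ run) parse

-- Phase 3 of B: collect the pieces (joined at the end); none = ValueError from int('')
def pvB_pieces : List (List Char × List Char) → List Char → Int → Option (List (List Char))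
  | [], lastframe, cursor => some [PySem.List.slice lastframe (some cursor) none]
  | (d, t) :: rest, lastframe, cursor =>
    match PySem.Int.ofChars? d with
    | none => none
    | some pos =>
      match pvB_pieces rest lastframe (pos + t.length) with
      | none => none
      | some ps => some (PySem.List.slice lastframe (some cursor) (some pos) :: t :: ps)

def reconstructFrame_alt (lastframe : String) (changedata : String) : String :=
  let r := pvB_fold (pvB_runs changedata.toList) [] [] []
  let parse := r.1 ++ [r.2]
  if parse.length = 1 ∧ r.2.2 = [] then lastframe
  else
    match pvB_pieces parse lastframe.toList 0 with
    | some ps => String.mk ps.flatten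
    | none => ""

-- ===== PRECONDITION & SPEC =====
-- Pre_ excludes exactly the inputs where A raises: changedata ending in a digit (the inner
-- while reads changedata[read] past the end: IndexError) and nonempty changedata without
-- any digit (int(''): ValueError).
def Pre_reconstructFrame (lastframe : String) (changedata : String) : Prop :=
  changedata.toList = [] ∨
    (changedata.toList.any Char.isDigit = true ∧
     changedata.toList.getLast?.all (fun c => !c.isDigit) = true)
instance (lastframe : String) (changedata : String) : Decidable (Pre_reconstructFrame lastframe changedata) := by
  unfold Pre_reconstructFrame; infer_instance

def pvWitness_reconstructFrame : String × String := ("abcdef", "2X4Y")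

-- On changedata ending in a digit A raises IndexError (the inner while checks
-- changedata[read] one past the end) while B returns the reconstructed frame.
def Raises_reconstructFrame (lastframe : String) (changedata : String) : Prop :=
  changedata.toList.getLast?.all (fun c => !c.isDigit) = false
instance (lastframe : String) (changedata : String) : Decidable (Raises_reconstructFrame lastframe changedata) := by
  unfold Raises_reconstructFrame; infer_instance
def pvRaiseWitness_reconstructFrame : String × String := ("abcdef", "2X4")
def pvRaiseWitnessOut_reconstructFrame : String := "abXdef"

def Spec_reconstructFrame (lastframe : String) (changedata : String) (out : String) : Prop := out = reconstructFrame_alt lastframe changedata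
instance (lastframe : String) (changedata : String) (out : String) : Decidable (Spec_reconstructFrame lastframe changedata out) := by unfold Spec_reconstructFrame; infer_instance

-- ===== CLAIM (what is proved, stated in full; the proofs are below) =====
def Claim_equal_reconstructFrame : Prop := ∀ (lastframe : String) (changedata : String), Dom_reconstructFrame lastframe changedata → Pre_reconstructFrame lastframe changedata → Spec_reconstructFrame lastframe changedata (reconstructFrame lastframe changedata)

def Claim_raises_reconstructFrame : Prop := (∀ (lastframe : String) (changedata : String), Dom_reconstructFrame lastframe changedata → Raises_reconstructFrame lastframe changedata → ¬ Pre_reconstructFrame lastframe changedata) ∧ (Dom_reconstructFrame (pvRaiseWitness_reconstructFrame.1) (pvRaiseWitness_reconstructFrame.2) ∧ Raises_reconstructFrame (pvRaiseWitness_reconstructFrame.1) (pvRaiseWitness_reconstructFrame.2) ∧ reconstructFrame_alt (pvRaiseWitness_reconstructFrame.1) (pvRaiseWitness_reconstructFrame.2) = pvRaiseWitnessOut_reconstructFrame)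

-- ===== LEMMAS AND PROOFS =====

-- B's run collector in closed form: it finishes the current run and restarts
theorem runsAux_spec : ∀ (l : List Char) (b : Bool) (cur : List Char),
    pvB_runsAux l b cur =
      (b, cur ++ l.takeWhile (fun x => x.isDigit == b)) :: pvB_runs (l.dropWhile (fun x => x.isDigit == b))
  | [], b, cur => by simp [pvB_runsAux, pvB_runs]
  | c :: rest, b, cur => by
    simp only [pvB_runsAux, List.takeWhile, List.dropWhile]
    by_cases h : (c.isDigit == b) = true
    · rw [if_pos h, h, runsAux_spec rest b (cur ++ [c])]
      simp
    · rw [if_neg h, Bool.not_eq_true] at *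
      rw [h]
      simp [pvB_runs]

theorem runs_cons_digit {c : Char} (rest : List Char) (hc : c.isDigit = true) :
    pvB_runs (c :: rest) =
      (true, c :: rest.takeWhile Char.isDigit) :: pvB_runs (rest.dropWhile Char.isDigit) := by
  rw [pvB_runs, runsAux_spec, hc]
  simp only [beq_true]
  rfl

theorem runs_cons_nondigit {c : Char} (rest : List Char) (hc : c.isDigit = false) :
    pvB_runs (c :: rest) =
      (false, c :: rest.takeWhile (fun x => !x.isDigit)) :: pvB_runs (rest.dropWhile (fun x => !x.isDigit)) := by
  rw [pvB_runs, runsAux_spec, hc]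
  simp only [beq_false]
  rfl

-- B appending a whole non-digit run equals appending its characters one at a time
theorem fold_nondigit_cons {c : Char} (rest d t : List Char) (parse : List (List Char × List Char))
    (hc : c.isDigit = false) :
    pvB_fold (pvB_runs (c :: rest)) d t parse = pvB_fold (pvB_runs rest) d (t ++ [c]) parse := by
  cases rest with
  | nil => simp [pvB_runs, pvB_runsAux, pvB_fold, hc]
  | cons c' r' =>
    by_cases h' : c'.isDigit = true
    · rw [runs_cons_nondigit _ hc]
      simp only [List.takeWhile, List.dropWhile, h', Bool.not_true]
      simp [pvB_fold]
    · rw [Bool.not_eq_true] at h'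
      rw [runs_cons_nondigit _ hc, runs_cons_nondigit _ h']
      simp only [List.takeWhile, List.dropWhile, h', Bool.not_false]
      simp [pvB_fold]

-- the head of a non-empty dropWhile fails the predicate
theorem head_dropWhile {p : Char → Bool} {l : List Char} {c : Char} {r : List Char}
    (h : l.dropWhile p = c :: r) : p c = false := by
  have h' : l.dropWhile p ≠ [] := by simp [h]
  have hh := List.head_dropWhile_not p h'
  have hc : (l.dropWhile p).head h' = c := by simp [h]
  rw [hc] at hh; exact hh

-- "does not end in a digit" is inherited by suffixes
theorem lastOk_suffix {l l' : List Char} (h : l' <:+ l)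
    (hl : ∀ c, l.getLast? = some c → c.isDigit = false) :
    ∀ c, l'.getLast? = some c → c.isDigit = false := by
  obtain ⟨pre, rfl⟩ := h
  intro c hc
  apply hl
  rcases l' with _ | ⟨x, xs⟩
  · simp at hc
  · rw [List.getLast?_append_of_ne_nil _ (List.cons_ne_nil x xs)]
    exact hc

-- if l does not end in a digit and is non-empty, dropping leading digits leaves something
theorem dropWhile_ne_nil {l : List Char}
    (hl : ∀ c, l.getLast? = some c → c.isDigit = false) (hne : l ≠ []) :
    l.dropWhile Char.isDigit ≠ [] := by
  intro h
  have hall := List.dropWhile_eq_nil_iff.mp h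
  have hmem := List.getLast_mem hne
  have := hl (l.getLast hne) (List.getLast?_eq_some_getLast hne)
  have := hall _ hmem
  simp_all

-- A's inner while in closed form: it consumes the leading digits into temp[0] and the
-- first following non-digit into temp[1] (or hits the IndexError if there is none)
theorem inner_run : ∀ (l d t : List Char) (cr : Bool) (parse : List (List Char × List Char)),
    pvA_loop l true (d, t) cr parse =
      match l.dropWhile Char.isDigit with
      | [] => none
      | c :: rest => pvA_loop rest false (d ++ l.takeWhile Char.isDigit, t ++ [c]) cr parse
  | [], d, t, cr, parse => by simp [pvA_loop]
  | c :: r, d, t, cr, parse => by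
    simp only [pvA_loop, List.takeWhile, List.dropWhile]
    by_cases h : c.isDigit = true
    · rw [h]
      simp only [if_true]
      rw [inner_run r (d ++ [c]) t cr parse]
      simp
    · rw [Bool.not_eq_true] at h
      rw [h]
      simp

theorem inner_run' {l : List Char} {c : Char} {rest : List Char}
    (h : l.dropWhile Char.isDigit = c :: rest) (d t : List Char) (cr : Bool)
    (parse : List (List Char × List Char)) :
    pvA_loop l true (d, t) cr parse
      = pvA_loop rest false (d ++ l.takeWhile Char.isDigit, t ++ [c]) cr parse := by
  rw [inner_run, h]

-- the parsing phases agree (on input that does not end in a digit)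
theorem loop_eq_fold : ∀ (n : Nat) (cs : List Char), cs.length ≤ n →
    (∀ c, cs.getLast? = some c → c.isDigit = false) →
    ∀ (d t : List Char) (cr : Bool) (parse : List (List Char × List Char)),
    (cr = true ↔ d ≠ []) →
    pvA_loop cs false (d, t) cr parse = some (pvB_fold (pvB_runs cs) d t parse) := by
  intro n
  induction n with
  | zero =>
    intro cs hlen _ d t cr parse _
    have : cs = [] := List.length_eq_zero_iff.mp (Nat.le_zero.mp hlen)
    subst this
    simp [pvA_loop, pvB_runs, pvB_fold]
  | succ n ih =>
    intro cs hlen hlast d t cr parse hinv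
    cases cs with
    | nil => simp [pvA_loop, pvB_runs, pvB_fold]
    | cons c rest =>
      by_cases hc : c.isDigit = true
      · -- a digit: A enters the inner while; B starts/extends a digit run
        have hrestne : rest ≠ [] := by
          rintro rfl
          have := hlast c (by simp)
          simp [hc] at this
        have hlrest : ∀ x, rest.getLast? = some x → x.isDigit = false :=
          lastOk_suffix (List.suffix_cons c rest) hlast
        have hdw : rest.dropWhile Char.isDigit ≠ [] := dropWhile_ne_nil hlrest hrestne
        obtain ⟨c', rest2, hdweq⟩ : ∃ c' rest2, rest.dropWhile Char.isDigit = c' :: rest2 := by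
          rcases h : rest.dropWhile Char.isDigit with _ | ⟨x, xs⟩
          · exact absurd h hdw
          · exact ⟨x, xs, rfl⟩
        have hc' : c'.isDigit = false := head_dropWhile hdweq
        have hlen2 : rest2.length ≤ n := by
          have h1 : (rest.dropWhile Char.isDigit).length ≤ rest.length :=
            List.length_dropWhile_le _ _
          rw [hdweq] at h1
          simp only [List.length_cons] at h1 hlen
          omega
        have hlast2 : ∀ x, rest2.getLast? = some x → x.isDigit = false := by
          refine lastOk_suffix ?_ hlast
          exact ((List.suffix_cons c' rest2).trans
            (hdweq ▸ List.dropWhile_suffix (l := rest) Char.isDigit)).trans (List.suffix_cons c rest)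
        cases cr with
        | false =>
          have hd : d = [] := by
            rcases hinv with ⟨-, h2⟩
            by_contra hne
            exact absurd (h2 hne) (by simp)
          subst hd
          have hstep : pvA_loop (c :: rest) false ([], t) false parse
              = pvA_loop rest true ([] ++ [c], t) true parse := by
            simp [pvA_loop, hc]
          rw [hstep, inner_run' hdweq]
          rw [ih rest2 hlen2 hlast2 ([] ++ [c] ++ rest.takeWhile Char.isDigit) (t ++ [c']) true
            parse (by simp)]
          rw [runs_cons_digit rest hc]
          have hfold : pvB_fold ((true, c :: rest.takeWhile Char.isDigit)
                :: pvB_runs (rest.dropWhile Char.isDigit)) [] t parse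
              = pvB_fold (pvB_runs (rest.dropWhile Char.isDigit))
                  (c :: rest.takeWhile Char.isDigit) t parse := by
            simp [pvB_fold]
          rw [hfold, hdweq, fold_nondigit_cons _ _ _ _ hc']
          simp
        | true =>
          have hd : d ≠ [] := hinv.mp rfl
          have hstep : pvA_loop (c :: rest) false (d, t) true parse
              = pvA_loop rest true ([c], []) true (parse ++ [(d, t)]) := by
            simp [pvA_loop, hc]
          rw [hstep, inner_run' hdweq]
          rw [ih rest2 hlen2 hlast2 ([c] ++ rest.takeWhile Char.isDigit) ([] ++ [c']) true
            (parse ++ [(d, t)]) (by simp)]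
          rw [runs_cons_digit rest hc]
          have hfold : pvB_fold ((true, c :: rest.takeWhile Char.isDigit)
                :: pvB_runs (rest.dropWhile Char.isDigit)) d t parse
              = pvB_fold (pvB_runs (rest.dropWhile Char.isDigit))
                  (c :: rest.takeWhile Char.isDigit) [] (parse ++ [(d, t)]) := by
            simp [pvB_fold, hd]
          rw [hfold, hdweq, fold_nondigit_cons _ _ _ _ hc']
          simp
      · -- not a digit: both sides append c to the current text
        rw [Bool.not_eq_true] at hc
        have : pvA_loop (c :: rest) false (d, t) cr parse
            = pvA_loop rest false (d, t ++ [c]) cr parse := by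
          simp [pvA_loop, hc]
        rw [this, fold_nondigit_cons rest d t parse hc]
        exact ih rest (by simpa using Nat.le_of_succ_le_succ hlen)
          (lastOk_suffix (List.suffix_cons c rest) hlast) d (t ++ [c]) cr parse hinv

-- slicing to len(lastframe) is slicing to the end
theorem slice_len_eq (lf : List Char) (a : Int) :
    PySem.List.slice lf (some a) (some (lf.length : Int)) = PySem.List.slice lf (some a) none := by
  simp only [PySem.List.slice, PySem.List.clampIdx]
  have h1 : (if (lf.length : Int) < 0 then (if (lf.length : Int) + (lf.length : Int) < 0 then 0
      else ((lf.length : Int) + (lf.length : Int)).toNat) else min ((lf.length : Int)).toNat lf.length)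
      = lf.length := by
    split_ifs <;> omega
  rw [h1]

-- reconstruction: A's running concatenation equals B's joined pieces
theorem recon_eq_pieces : ∀ (ps : List (List Char × List Char)) (lf out : List Char) (cur : Int),
    pvA_reconstruct ps lf cur out = (pvB_pieces ps lf cur).map (fun ls => out ++ ls.flatten)
  | [], lf, out, cur => by
    simp [pvA_reconstruct, pvB_pieces, slice_len_eq]
  | (d, t) :: rest, lf, out, cur => by
    simp only [pvA_reconstruct, pvB_pieces]
    cases PySem.Int.ofChars? d with
    | none => simp
    | some pos =>
      simp only []
      rw [recon_eq_pieces rest lf (out ++ PySem.List.slice lf (some cur) (some pos) ++ t)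
        (pos + t.length)]
      cases pvB_pieces rest lf (pos + (t.length : Int)) with
      | none => simp
      | some ps => simp

-- ===== VERDICT (by name: the statement is the Claim_ definition above) =====
theorem reconstructFrame_spec : Claim_equal_reconstructFrame := by
  intro lastframe changedata _ hpre
  unfold Spec_reconstructFrame reconstructFrame reconstructFrame_alt
  have hlast : ∀ c, changedata.toList.getLast? = some c → c.isDigit = false := by
    rcases hpre with h | ⟨-, h⟩
    · rw [h]; simp
    · intro c hc; rw [hc] at h; simpa using h
  have hloop := loop_eq_fold changedata.toList.length changedata.toList le_rfl hlast
    [] [] false [] (by simp)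
  rcases hr : pvB_fold (pvB_runs changedata.toList) [] [] [] with ⟨parse0, d, t⟩
  rw [hr] at hloop
  rw [hloop]
  simp only []
  have hcond : ((parse0 ++ [(d, t)]).length = 1 ∧ ((parse0 ++ [(d, t)]).headD ([], [])).2 = [])
      ↔ ((parse0 ++ [(d, t)]).length = 1 ∧ t = []) := by
    cases parse0 <;> simp
  rw [if_congr hcond rfl rfl]
  split_ifs with h
  · rfl
  · rw [recon_eq_pieces]
    cases pvB_pieces (parse0 ++ [(d, t)]) lastframe.toList 0 with
    | none => rfl
    | some ps => simp

@[simp]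
theorem reconstructFrame_raises : Claim_raises_reconstructFrame := by
  unfold Claim_raises_reconstructFrame
  refine ⟨?_, by decide⟩
  intro lastframe changedata _ hr hpre
  unfold Raises_reconstructFrame at hr
  unfold Pre_reconstructFrame at hpre
  rcases hpre with h | ⟨_, h⟩
  · rw [h] at hr; simp at hr
  · rw [h] at hr; simp at hr
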